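-- pv_equiv track=rewrite | github.com/ywzeng/redirection_graph | related_work/tifs2021_hmg/hmg_feature_extraction.py | get_edge_features
-- ===== SOURCE A (Python) =====
-- def get_edge_features(node_list: list, edge_list: list) -> list:
--     """
--     Given the node list and edge list, extract the edge property features.
--     Three edge features:
--         1. F1: The number of 30X redirection edges;
--         2. F2: The number of 30X redirection edges that connecting two nodes with different domains;
--         3. F3: Length of the longest 30X redirection chain.
--     :param node_list:
--     :param edge_list:
--     :return:
--     """
--     redirect_edge_list = list()
--     involved_sn_set = set()
--     for edge in edge_list:
--         if edge[-1] == 'location':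
--             redirect_edge_list += [edge]
--             involved_sn_set.add(edge[0])
--             involved_sn_set.add(edge[1])
--     sn_node_dict = dict()
--     for node in node_list:
--         sn = node[0]
--         if sn in involved_sn_set:
--             sn_node_dict[sn] = node[:]
--             involved_sn_set.remove(sn)
--         if not len(involved_sn_set):
--             break
--
--     # Speed up the lookup of redirection path.
--     start_sn_dict = dict()      # key is start SN of and edge, value is the edge.
--     for edge in redirect_edge_list:
--         start_sn_dict[edge[0]] = edge[:]
--
--     # F1
--     redirect_cnt = len(redirect_edge_list)
--
--     # F2, F3
--     cross_domain_cnt = 0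
--     max_path_len = 0
--     for edge in redirect_edge_list:
--         # F2
--         sn1, sn2 = edge[0], edge[1]
--         node1, node2 = sn_node_dict[sn1], sn_node_dict[sn2]
--         if node1[3] != node2[3]:
--             cross_domain_cnt += 1
--         # F3
--         path_len = 1
--         while sn1 in start_sn_dict:
--             path_len += 1
--             sn1 = start_sn_dict[sn1][1]
--         max_path_len = max(path_len, max_path_len)
--
--     return [redirect_cnt, cross_domain_cnt, max_path_len]
-- ===== SOURCE B (Python) =====
-- def get_edge_features(node_list: list, edge_list: list) -> list:
--     # Collect (src, dst) pairs of 30X redirect edges in one comprehension;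
--     # chain lengths are memoized so each chain is walked once.
--     pairs = [(e[0], e[1]) for e in edge_list if e[-1] == 'location']
--     succ = dict(pairs)
--     remaining = {s for p in pairs for s in p}
--     dom = {}
--     for node in node_list:
--         if not remaining:
--             break
--         sn = node[0]
--         if sn in remaining:
--             dom[sn] = node[3]
--             remaining.remove(sn)
--     memo = {}
--
--     def clen(s):
--         # length of the redirect chain starting at s (number of edges), memoized
--         chain = []
--         while s in succ and s not in memo:
--             chain.append(s)
--             s = succ[s]
--         val = memo.get(s, 0)
--         for t in reversed(chain):
--             val += 1
--             memo[t] = val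
--         return val
--
--     cross = 0
--     longest = 0
--     for a, b in pairs:
--         if dom[a] != dom[b]:
--             cross += 1
--         longest = max(longest, 1 + clen(a))
--     return [len(pairs), cross, longest]
-- ===== Notes on version B (the rewrite author's own statement) =====
-- stated objective: alternative
-- what changed: B walks each redirect chain once and memoizes the chain length of every visited node, instead of A's fresh while-loop walk from every edge; B keeps only (src,dst) pairs and a src->domain dict, and its node scan breaks before reading a row once all involved nodes are found, so it matches A on every input A returns on.
import Mathlib
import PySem

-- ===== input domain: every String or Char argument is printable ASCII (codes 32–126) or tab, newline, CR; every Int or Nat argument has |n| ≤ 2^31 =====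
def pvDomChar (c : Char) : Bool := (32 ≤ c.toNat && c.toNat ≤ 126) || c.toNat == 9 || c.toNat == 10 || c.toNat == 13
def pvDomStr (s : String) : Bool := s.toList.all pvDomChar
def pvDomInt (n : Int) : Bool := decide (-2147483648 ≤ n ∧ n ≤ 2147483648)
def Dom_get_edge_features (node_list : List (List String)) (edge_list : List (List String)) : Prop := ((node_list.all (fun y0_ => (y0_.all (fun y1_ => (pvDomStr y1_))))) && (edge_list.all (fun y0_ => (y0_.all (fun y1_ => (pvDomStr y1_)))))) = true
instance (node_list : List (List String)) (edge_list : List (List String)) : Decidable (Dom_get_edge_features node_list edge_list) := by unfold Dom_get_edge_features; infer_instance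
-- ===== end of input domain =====

-- ===== PORT A =====
-- B memoizes the redirect-chain length of every node, replacing A's per-edge chain walk; shared field accessors:
def pvHd (e : List String) : String := PySem.List.pyGetD e 0 ""
def pvSnd (e : List String) : String := PySem.List.pyGetD e 1 ""
def pvIsLoc (e : List String) : Bool := PySem.List.pyGetD e (-1) "" == "location"

def pvA_loop1 (edge_list : List (List String)) : List (List String) × PySem.Set String :=
  edge_list.foldl (fun acc edge =>
    if pvIsLoc edge then
      (acc.1 ++ [edge], PySem.Set.add (PySem.Set.add acc.2 (pvHd edge)) (pvSnd edge))
    else acc) ([], PySem.Set.empty)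

def pvA_loop2 : List (List String) → PySem.Set String → PySem.Dict String (List String) → PySem.Dict String (List String)
  | [], _, d => d
  | node :: rest, inv, d =>
    let sn := pvHd node
    let st := if PySem.Set.contains inv sn
              then (d.insert sn node, (PySem.Set.remove? inv sn).getD inv)
              else (d, inv)
    if PySem.Set.len st.2 = 0 then st.1 else pvA_loop2 rest st.2 st.1

def pvA_start (redirect : List (List String)) : PySem.Dict String (List String) :=
  redirect.foldl (fun d edge => d.insert (pvHd edge) edge) PySem.Dict.empty

-- the 'while sn1 in start_sn_dict' loop; the fuel argument only makes it total (Pre_ excludes cycles)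
def pvA_walk (sd : PySem.Dict String (List String)) : Nat → String → Int → Int
  | 0, _, plen => plen
  | fuel+1, sn, plen =>
    match sd.get? sn with
    | none => plen
    | some e => pvA_walk sd fuel (pvSnd e) (plen + 1)

def get_edge_features (node_list : List (List String)) (edge_list : List (List String)) : List Int :=
  let rlInv := pvA_loop1 edge_list
  let snDict := pvA_loop2 node_list rlInv.2 PySem.Dict.empty
  let startDict := pvA_start rlInv.1
  let cm := rlInv.1.foldl (fun (acc : Int × Int) edge =>
      let c := if PySem.List.pyGetD (snDict.getD (pvHd edge) []) 3 "" ≠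
                  PySem.List.pyGetD (snDict.getD (pvSnd edge) []) 3 "" then acc.1 + 1 else acc.1
      (c, max (pvA_walk startDict (edge_list.length + 1) (pvHd edge) 1) acc.2)) (0, 0)
  [(rlInv.1.length : Int), cm.1, cm.2]

-- ===== PORT B =====
def pvB_pairs (edge_list : List (List String)) : List (String × String) :=
  (edge_list.filter pvIsLoc).map (fun e => (pvHd e, pvSnd e))

def pvB_succ (pairs : List (String × String)) : PySem.Dict String String :=
  pairs.foldl (fun d p => d.insert p.1 p.2) PySem.Dict.empty

def pvB_needed (pairs : List (String × String)) : PySem.Set String :=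
  pairs.foldl (fun s p => PySem.Set.add (PySem.Set.add s p.1) p.2) PySem.Set.empty

-- 'for node in node_list: if not remaining: break; …' — break checked BEFORE the row is read
def pvB_dom : List (List String) → PySem.Set String → PySem.Dict String String → PySem.Dict String String
  | [], _, d => d
  | node :: rest, rem, d =>
    if PySem.Set.len rem = 0 then d
    else
      let sn := pvHd node
      if PySem.Set.contains rem sn then
        pvB_dom rest ((PySem.Set.remove? rem sn).getD rem) (d.insert sn (PySem.List.pyGetD node 3 ""))
      else pvB_dom rest rem d

-- 'while s in succ and s not in memo' (fuel only makes it total; Pre_ excludes cycles)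
def pvB_collect (succ : PySem.Dict String String) (memo : PySem.Dict String Int) :
    Nat → String → List String → List String × String
  | 0, s, ch => (ch, s)
  | fuel+1, s, ch =>
    if succ.contains s && !(memo.contains s) then pvB_collect succ memo fuel (succ.getD s "") (ch ++ [s])
    else (ch, s)

def pvB_clen (succ : PySem.Dict String String) (memo : PySem.Dict String Int) (fuel : Nat) (s : String) :
    Int × PySem.Dict String Int :=
  let ce := pvB_collect succ memo fuel s []
  let r := ce.1.reverse.foldl (fun (p : PySem.Dict String Int × Int) t => (p.1.insert t (p.2 + 1), p.2 + 1))
             (memo, memo.getD ce.2 0)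
  (r.2, r.1)

def get_edge_features_alt (node_list : List (List String)) (edge_list : List (List String)) : List Int :=
  let pairs := pvB_pairs edge_list
  let succ := pvB_succ pairs
  let dom := pvB_dom node_list (pvB_needed pairs) PySem.Dict.empty
  let cm := pairs.foldl (fun (acc : Int × Int × PySem.Dict String Int) p =>
      let c := if dom.getD p.1 "" ≠ dom.getD p.2 "" then acc.1 + 1 else acc.1
      let ve := pvB_clen succ acc.2.2 (edge_list.length + 1) p.1
      (c, max acc.2.1 (1 + ve.1), ve.2)) (0, 0, PySem.Dict.empty)
  [(pairs.length : Int), cm.1, cm.2.1]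

-- ===== PRECONDITION & SPEC =====
def pvLocEdges (el : List (List String)) : List (List String) := el.filter pvIsLoc

-- the redirect successor of s: target of the LAST 'location' edge starting at s (Python dict overwrite)
def pvStep (el : List (List String)) (s : String) : Option String :=
  ((pvLocEdges el).reverse.find? (fun e => pvHd e == s)).map pvSnd

-- 'walking the redirect successors from s leaves the redirect graph within f steps'
def pvEscapes (el : List (List String)) : Nat → String → Bool
  | 0, s => (pvStep el s).isNone
  | f+1, s => match pvStep el s with | none => true | some t => pvEscapes el f t

-- Pre_ excludes exactly the inputs on which Python A raises or loops forever: an empty edge row, a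
-- 'location' edge with fewer than 2 fields, an involved node missing from node_list or whose first
-- matching row has fewer than 4 fields, a redirect cycle, and an empty node row that A's node scan
-- actually REACHES (row 0, or a row before all involved nodes have been seen); an empty node row
-- occurring after A's early break is inside Pre_.
def Pre_get_edge_features (node_list : List (List String)) (edge_list : List (List String)) : Prop :=
  (∀ i ∈ List.range node_list.length,
    (i = 0 ∨ ∃ e ∈ edge_list, pvIsLoc e = true ∧
      (pvHd e ∉ (node_list.take i).map pvHd ∨ pvSnd e ∉ (node_list.take i).map pvHd)) →
    node_list.getD i [] ≠ []) ∧
  (∀ e ∈ edge_list, e ≠ []) ∧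
  ∀ e ∈ edge_list, pvIsLoc e = true →
    2 ≤ e.length ∧
    (∀ sn ∈ [pvHd e, pvSnd e],
      ((node_list.find? (fun m => pvHd m == sn)).any (fun n => decide (4 ≤ n.length))) = true) ∧
    pvEscapes edge_list edge_list.length (pvHd e) = true

instance (node_list : List (List String)) (edge_list : List (List String)) :
    Decidable (Pre_get_edge_features node_list edge_list) := by
  unfold Pre_get_edge_features; infer_instance

def pvWitness_get_edge_features : List (List String) × List (List String) :=
  ([["a", "u", "u", "d1"], ["b", "u", "u", "d2"]], [["a", "b", "location"]])

def Spec_get_edge_features (node_list : List (List String)) (edge_list : List (List String)) (out : List Int) : Prop := out = get_edge_features_alt node_list edge_list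
instance (node_list : List (List String)) (edge_list : List (List String)) (out : List Int) : Decidable (Spec_get_edge_features node_list edge_list out) := by unfold Spec_get_edge_features; infer_instance

-- ===== CLAIM (what is proved, stated in full; the proofs are below) =====
def Claim_equal_get_edge_features : Prop := ∀ (node_list : List (List String)) (edge_list : List (List String)), Dom_get_edge_features node_list edge_list → Pre_get_edge_features node_list edge_list → Spec_get_edge_features node_list edge_list (get_edge_features node_list edge_list)

-- ===== LEMMAS AND PROOFS =====

-- naive chain length at bounded fuel (truncates exactly like pvA_walk)
def pvClenF (sd : PySem.Dict String String) : Nat → String → Int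
  | 0, _ => 0
  | f+1, s => match sd.get? s with | none => 0 | some t => 1 + pvClenF sd f t

-- a successor path s = c1 → c2 → … → ck → e with the chain-length step equations recorded
def pvChain (sd : PySem.Dict String String) (C : String → Int) : String → List String → String → Prop
  | s, [], e => s = e
  | s, c :: cs, e => c = s ∧ ∃ t, sd.get? s = some t ∧ C s = 1 + C t ∧ pvChain sd C t cs e

-- memo invariant: every memoised value is the true chain length
def pvInv (memo : PySem.Dict String Int) (C : String → Int) : Prop :=
  ∀ s v, memo.get? s = some v → v = C s

def pvNeededOf (el : List (List String)) : PySem.Set String :=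
  (pvLocEdges el).foldl (fun s e => PySem.Set.add (PySem.Set.add s (pvHd e)) (pvSnd e)) PySem.Set.empty

theorem pv_loop1_aux : ∀ (el : List (List String)) (r : List (List String)) (s : PySem.Set String),
    el.foldl (fun acc edge =>
      if pvIsLoc edge then
        (acc.1 ++ [edge], PySem.Set.add (PySem.Set.add acc.2 (pvHd edge)) (pvSnd edge))
      else acc) (r, s) =
    (r ++ pvLocEdges el,
      (pvLocEdges el).foldl (fun s e => PySem.Set.add (PySem.Set.add s (pvHd e)) (pvSnd e)) s) := by
  intro el
  induction el with
  | nil => intro r s; simp [pvLocEdges]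
  | cons e el ih =>
    intro r s
    by_cases h : pvIsLoc e
    · simp only [List.foldl_cons, h, if_pos, pvLocEdges, List.filter_cons_of_pos h]
      rw [ih]
      simp [pvLocEdges]
    · simp only [List.foldl_cons, if_neg h, pvLocEdges, List.filter_cons_of_neg (by simpa using h)]
      exact ih r s

theorem pv_loop1_eq (el : List (List String)) : pvA_loop1 el = (pvLocEdges el, pvNeededOf el) := by
  unfold pvA_loop1 pvNeededOf
  rw [pv_loop1_aux]
  simp

theorem pv_pairs_eq (el : List (List String)) :
    pvB_pairs el = (pvLocEdges el).map (fun e => (pvHd e, pvSnd e)) := rfl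

theorem pv_needed_eq (el : List (List String)) : pvB_needed (pvB_pairs el) = pvNeededOf el := by
  unfold pvB_needed pvNeededOf
  rw [pv_pairs_eq, List.foldl_map]

theorem pv_foldl_insert_get? {β : Type} (k : List String → String) (v : List String → β) :
    ∀ (L : List (List String)) (d : PySem.Dict String β) (s : String),
      (L.foldl (fun d e => d.insert (k e) (v e)) d).get? s =
        ((L.reverse.find? (fun e => k e == s)).map v).or (d.get? s) := by
  intro L
  induction L with
  | nil => intro d s; simp
  | cons e L ih =>
    intro d s
    simp only [List.foldl_cons, List.reverse_cons, List.find?_append]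
    rw [ih]
    cases hf : L.reverse.find? (fun e => k e == s) with
    | some x => simp only [Option.some_or, Option.map_some]
    | none =>
      simp only [Option.map_none, Option.none_or]
      rw [PySem.Dict.get?_insert]
      by_cases hke : (k e == s) = true
      · have hs : k e = s := beq_iff_eq.mp hke
        have hfind : List.find? (fun e' => k e' == s) [e] = some e := by simp [hke]
        rw [hfind, if_pos hs.symm]
        rfl
      · have hfind : List.find? (fun e' => k e' == s) [e] = none := by simp_all
        have hne : s ≠ k e := fun hh => hke (beq_iff_eq.mpr hh.symm)
        rw [hfind, if_neg hne]
        rfl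

theorem pv_succ_get? (el : List (List String)) (s : String) :
    (pvB_succ (pvB_pairs el)).get? s = pvStep el s := by
  unfold pvB_succ pvStep
  rw [pv_pairs_eq, List.foldl_map]
  have := pv_foldl_insert_get? pvHd pvSnd (pvLocEdges el) PySem.Dict.empty s
  simp only [PySem.Dict.get?_empty, Option.or_none] at this
  exact this

theorem pv_start_get? (el : List (List String)) (s : String) :
    (pvA_start (pvLocEdges el)).get? s = (pvLocEdges el).reverse.find? (fun e => pvHd e == s) := by
  unfold pvA_start
  have := pv_foldl_insert_get? pvHd (fun e => e) (pvLocEdges el) PySem.Dict.empty s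
  simp only [PySem.Dict.get?_empty, Option.or_none] at this
  simpa using this

theorem pv_start_rel (el : List (List String)) (s : String) :
    (pvB_succ (pvB_pairs el)).get? s = ((pvA_start (pvLocEdges el)).get? s).map pvSnd := by
  rw [pv_succ_get?, pv_start_get?]
  rfl

theorem pv_walk_eq (el : List (List String)) :
    ∀ (f : Nat) (s : String) (plen : Int),
      pvA_walk (pvA_start (pvLocEdges el)) f s plen = plen + pvClenF (pvB_succ (pvB_pairs el)) f s := by
  intro f
  induction f with
  | zero => intro s plen; simp [pvA_walk, pvClenF]
  | succ f ih =>
    intro s plen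
    have hrel := pv_start_rel el s
    cases hst : (pvA_start (pvLocEdges el)).get? s with
    | none =>
      rw [hst] at hrel; simp only [Option.map_none] at hrel
      simp [pvA_walk, pvClenF, hst, hrel]
    | some e =>
      rw [hst] at hrel; simp only [Option.map_some] at hrel
      simp only [pvA_walk, pvClenF, hst, hrel]
      rw [ih]
      ring

theorem pv_clenF_stable (el : List (List String)) :
    ∀ (f : Nat) (s : String), pvEscapes el f s = true →
      ∀ (F : Nat), f ≤ F → pvClenF (pvB_succ (pvB_pairs el)) F s = pvClenF (pvB_succ (pvB_pairs el)) f s := by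
  intro f
  induction f with
  | zero =>
    intro s hesc F _
    have hnone : (pvB_succ (pvB_pairs el)).get? s = none := by
      rw [pv_succ_get?]
      simpa [pvEscapes, Option.isNone_iff_eq_none] using hesc
    cases F with
    | zero => rfl
    | succ F => simp [pvClenF, hnone]
  | succ f ih =>
    intro s hesc F hF
    cases hst : (pvB_succ (pvB_pairs el)).get? s with
    | none =>
      obtain ⟨F', rfl⟩ : ∃ F', F = F' + 1 := ⟨F - 1, by omega⟩
      simp [pvClenF, hst]
    | some t =>
      have hesc' : pvEscapes el f t = true := by
        have hstep : pvStep el s = some t := by rw [← pv_succ_get?]; exact hst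
        simpa [pvEscapes, hstep] using hesc
      obtain ⟨F', rfl⟩ : ∃ F', F = F' + 1 := ⟨F - 1, by omega⟩
      simp only [pvClenF, hst]
      rw [ih t hesc' F' (by omega)]

theorem pv_trueClen_step (el : List (List String)) {f : Nat} {s t : String}
    (hesc : pvEscapes el f s = true) (hf : f ≤ el.length)
    (h : (pvB_succ (pvB_pairs el)).get? s = some t) :
    pvClenF (pvB_succ (pvB_pairs el)) (el.length + 1) s =
      1 + pvClenF (pvB_succ (pvB_pairs el)) (el.length + 1) t := by
  have hstep : pvStep el s = some t := by rw [← pv_succ_get?]; exact h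
  cases f with
  | zero =>
    exfalso
    simp [pvEscapes, hstep] at hesc
  | succ f =>
    have hesc' : pvEscapes el f t = true := by simpa [pvEscapes, hstep] using hesc
    have h1 : pvClenF (pvB_succ (pvB_pairs el)) (el.length + 1) s =
        1 + pvClenF (pvB_succ (pvB_pairs el)) el.length t := by
      simp [pvClenF, h]
    rw [h1, pv_clenF_stable el f t hesc' el.length (by omega),
      pv_clenF_stable el f t hesc' (el.length + 1) (by omega)]

theorem pv_collect_spec (el : List (List String)) (memo : PySem.Dict String Int) :
    ∀ (f : Nat) (s : String) (g : Nat) (ch0 : List String),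
      pvEscapes el f s = true → f ≤ g → f ≤ el.length →
      ∃ ch e, pvB_collect (pvB_succ (pvB_pairs el)) memo g s ch0 = (ch0 ++ ch, e) ∧
        ((pvB_succ (pvB_pairs el)).get? e = none ∨ memo.contains e = true) ∧
        pvChain (pvB_succ (pvB_pairs el)) (pvClenF (pvB_succ (pvB_pairs el)) (el.length + 1)) s ch e := by
  intro f
  induction f with
  | zero =>
    intro s g ch0 hesc _ _
    have hnone : (pvB_succ (pvB_pairs el)).get? s = none := by
      rw [pv_succ_get?]
      simpa [pvEscapes, Option.isNone_iff_eq_none] using hesc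
    have hcont : (pvB_succ (pvB_pairs el)).contains s = false := by
      rw [PySem.Dict.contains_eq_isSome_get?, hnone]; rfl
    refine ⟨[], s, ?_, Or.inl hnone, rfl⟩
    cases g with
    | zero => simp [pvB_collect]
    | succ g => simp [pvB_collect, hcont]
  | succ f ih =>
    intro s g ch0 hesc hg hlen
    cases hst : (pvB_succ (pvB_pairs el)).get? s with
    | none =>
      have hcont : (pvB_succ (pvB_pairs el)).contains s = false := by
        rw [PySem.Dict.contains_eq_isSome_get?, hst]; rfl
      refine ⟨[], s, ?_, Or.inl hst, rfl⟩
      obtain ⟨g', rfl⟩ : ∃ g', g = g' + 1 := ⟨g - 1, by omega⟩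
      simp [pvB_collect, hcont]
    | some t =>
      have hcont : (pvB_succ (pvB_pairs el)).contains s = true := by
        rw [PySem.Dict.contains_eq_isSome_get?, hst]; rfl
      have hstep : pvStep el s = some t := by rw [← pv_succ_get?]; exact hst
      have hesc' : pvEscapes el f t = true := by simpa [pvEscapes, hstep] using hesc
      obtain ⟨g', rfl⟩ : ∃ g', g = g' + 1 := ⟨g - 1, by omega⟩
      by_cases hm : memo.contains s = true
      · refine ⟨[], s, ?_, Or.inr hm, rfl⟩
        simp [pvB_collect, hm]
      · have hm' : memo.contains s = false := by simpa using hm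
        have hgetD : (pvB_succ (pvB_pairs el)).getD s "" = t :=
          PySem.Dict.getD_of_get?_eq_some _ _ hst
        obtain ⟨ch, e, hrun, hstop, hchain⟩ := ih t g' (ch0 ++ [s]) hesc' (by omega) (by omega)
        refine ⟨s :: ch, e, ?_, hstop, ?_⟩
        · show pvB_collect _ memo (g' + 1) s ch0 = _
          simp only [pvB_collect, hcont, hm', Bool.not_false, Bool.and_self, if_pos, hgetD]
          rw [hrun]
          simp
        · exact ⟨rfl, t, hst, pv_trueClen_step el hesc hlen hst, hchain⟩

theorem pv_chain_append (sd : PySem.Dict String String) (C : String → Int) :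
    ∀ (ch : List String) (s c e : String), pvChain sd C s (ch ++ [c]) e →
      pvChain sd C s ch c ∧ sd.get? c = some e ∧ C c = 1 + C e := by
  intro ch
  induction ch with
  | nil =>
    intro s c e h
    obtain ⟨rfl, t, hget, hC, ht⟩ := h
    cases ht
    exact ⟨rfl, hget, hC⟩
  | cons a ch ih =>
    intro s c e h
    obtain ⟨rfl, t, hget, hC, ht⟩ := h
    obtain ⟨h1, h2, h3⟩ := ih t c e ht
    exact ⟨⟨rfl, t, hget, hC, h1⟩, h2, h3⟩

theorem pv_assign_spec (sd : PySem.Dict String String) (C : String → Int) :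
    ∀ (ch : List String) (memo : PySem.Dict String Int) (s e : String) (b : Int),
      pvInv memo C → pvChain sd C s ch e → b = C e →
      (ch.reverse.foldl (fun (p : PySem.Dict String Int × Int) t => (p.1.insert t (p.2 + 1), p.2 + 1))
        (memo, b)).2 = C s ∧
      pvInv (ch.reverse.foldl (fun (p : PySem.Dict String Int × Int) t => (p.1.insert t (p.2 + 1), p.2 + 1))
        (memo, b)).1 C := by
  intro ch
  induction ch using List.reverseRecOn with
  | nil =>
    intro memo s e b hInv hchain hb
    cases hchain
    exact ⟨hb.symm ▸ rfl, hInv⟩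
  | append_singleton ch c ih =>
    intro memo s e b hInv hchain hb
    obtain ⟨hchain', hget, hC⟩ := pv_chain_append sd C ch s c e hchain
    have hInv' : pvInv (memo.insert c (b + 1)) C := by
      intro x v hx
      rw [PySem.Dict.get?_insert] at hx
      by_cases hxc : x = c
      · rw [if_pos hxc] at hx
        cases hx
        rw [hxc, hC, hb]; ring
      · rw [if_neg hxc] at hx
        exact hInv x v hx
    have := ih (memo.insert c (b + 1)) s c (b + 1) hInv' hchain' (by rw [hb, hC]; ring)
    simpa using this

theorem pv_stop_base (el : List (List String)) (memo : PySem.Dict String Int) (e : String)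
    (hInv : pvInv memo (pvClenF (pvB_succ (pvB_pairs el)) (el.length + 1)))
    (hstop : (pvB_succ (pvB_pairs el)).get? e = none ∨ memo.contains e = true) :
    memo.getD e 0 = pvClenF (pvB_succ (pvB_pairs el)) (el.length + 1) e := by
  rw [PySem.Dict.getD_eq_get?_getD]
  cases hm : memo.get? e with
  | some v => simpa using hInv e v hm
  | none =>
    rcases hstop with hnone | hcont
    · simp [pvClenF, hnone]
    · rw [PySem.Dict.contains_eq_isSome_get?, hm] at hcont
      cases hcont

theorem pv_clen_spec (el : List (List String)) (memo : PySem.Dict String Int) (s : String)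
    (hInv : pvInv memo (pvClenF (pvB_succ (pvB_pairs el)) (el.length + 1)))
    (hesc : pvEscapes el el.length s = true) :
    (pvB_clen (pvB_succ (pvB_pairs el)) memo (el.length + 1) s).1 =
        pvClenF (pvB_succ (pvB_pairs el)) (el.length + 1) s ∧
      pvInv (pvB_clen (pvB_succ (pvB_pairs el)) memo (el.length + 1) s).2
        (pvClenF (pvB_succ (pvB_pairs el)) (el.length + 1)) := by
  obtain ⟨ch, e, hrun, hstop, hchain⟩ :=
    pv_collect_spec el memo el.length s (el.length + 1) [] hesc (by omega) le_rfl
  have hbase := pv_stop_base el memo e hInv hstop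
  have hassign := pv_assign_spec (pvB_succ (pvB_pairs el))
    (pvClenF (pvB_succ (pvB_pairs el)) (el.length + 1)) ch memo s e (memo.getD e 0) hInv hchain hbase
  unfold pvB_clen
  rw [hrun]
  simpa using hassign

theorem pv_remove_getD (inv : PySem.Set String) (x : String) (h : x ∈ inv) :
    (PySem.Set.remove? inv x).getD inv = inv.discard x := by
  simp [PySem.Set.remove?, PySem.Set.contains_eq_listContains, h]

theorem pv_loop2_get_notmem :
    ∀ (nl : List (List String)) (inv : PySem.Set String) (d : PySem.Dict String (List String)) (sn : String),
      sn ∉ inv → (pvA_loop2 nl inv d).get? sn = d.get? sn := by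
  intro nl
  induction nl with
  | nil => intro inv d sn _; rfl
  | cons node rest ih =>
    intro inv d sn hsn
    by_cases hc : PySem.Set.contains inv (pvHd node) = true
    · have hmem : pvHd node ∈ inv := (PySem.Set.contains_iff inv (pvHd node)).mp hc
      have hne : sn ≠ pvHd node := fun h => hsn (h ▸ hmem)
      have hsn' : sn ∉ inv.discard (pvHd node) := fun h =>
        hsn ((PySem.Set.mem_discard inv (pvHd node) sn).mp h).1
      simp only [pvA_loop2, hc, if_true, pv_remove_getD inv (pvHd node) hmem]
      split
      · exact PySem.Dict.get?_insert_of_ne _ _ hne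
      · rw [ih _ _ sn hsn']
        exact PySem.Dict.get?_insert_of_ne _ _ hne
    · simp only [pvA_loop2, Bool.not_eq_true] at hc ⊢
      simp only [hc, Bool.false_eq_true, if_false]
      split
      · rfl
      · exact ih inv d sn hsn

theorem pv_loop2_get_mem :
    ∀ (nl : List (List String)) (inv : PySem.Set String) (d : PySem.Dict String (List String)) (sn : String),
      inv.Nodup → (∀ s ∈ inv, d.get? s = none) → sn ∈ inv →
      (pvA_loop2 nl inv d).get? sn = nl.find? (fun m => pvHd m == sn) := by
  intro nl
  induction nl with
  | nil =>
    intro inv d sn _ hd hsn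
    simpa [pvA_loop2] using hd sn hsn
  | cons node rest ih =>
    intro inv d sn hnd hd hsn
    by_cases heq : pvHd node = sn
    · have hc : PySem.Set.contains inv (pvHd node) = true :=
        (PySem.Set.contains_iff inv (pvHd node)).mpr (heq ▸ hsn)
      have hmem : pvHd node ∈ inv := (PySem.Set.contains_iff inv (pvHd node)).mp hc
      have hfind : List.find? (fun m => pvHd m == sn) (node :: rest) = some node := by
        simp [List.find?, heq]
      rw [hfind]
      have hnotin : sn ∉ inv.discard (pvHd node) := fun h =>
        ((PySem.Set.mem_discard inv (pvHd node) sn).mp h).2 (heq ▸ rfl)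
      simp only [pvA_loop2, hc, if_true, pv_remove_getD inv (pvHd node) hmem]
      split
      · rw [heq]; exact PySem.Dict.get?_insert_self _ _ _
      · rw [pv_loop2_get_notmem rest _ _ sn hnotin, heq]
        exact PySem.Dict.get?_insert_self _ _ _
    · have hbeq : (pvHd node == sn) = false := beq_eq_false_iff_ne.mpr heq
      have hfind : List.find? (fun m => pvHd m == sn) (node :: rest) =
          List.find? (fun m => pvHd m == sn) rest := by
        simp [List.find?, hbeq]
      rw [hfind]
      by_cases hc : PySem.Set.contains inv (pvHd node) = true
      · have hmem : pvHd node ∈ inv := (PySem.Set.contains_iff inv (pvHd node)).mp hc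
        have hsn' : sn ∈ inv.discard (pvHd node) :=
          (PySem.Set.mem_discard inv (pvHd node) sn).mpr ⟨hsn, fun h => heq h.symm⟩
        have hnd' : (inv.discard (pvHd node)).Nodup := PySem.Set.nodup_discard inv (pvHd node) hnd
        have hd' : ∀ s ∈ inv.discard (pvHd node), (d.insert (pvHd node) node).get? s = none := by
          intro s hs
          obtain ⟨hs1, hs2⟩ := (PySem.Set.mem_discard inv (pvHd node) s).mp hs
          rw [PySem.Dict.get?_insert_of_ne _ _ hs2]
          exact hd s hs1
        simp only [pvA_loop2, hc, if_true, pv_remove_getD inv (pvHd node) hmem]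
        split
        · rename_i hlen
          exfalso
          have hnil : inv.discard (pvHd node) = [] := by
            simp only [PySem.Set.len_eq] at hlen
            exact List.eq_nil_of_length_eq_zero (by exact_mod_cast hlen)
          rw [hnil] at hsn'
          cases hsn'
        · exact ih _ _ sn hnd' hd' hsn'
      · simp only [Bool.not_eq_true] at hc
        have hlen : ¬ (PySem.Set.len inv = 0) := by
          simp only [PySem.Set.len_eq]
          intro h
          have hnil : inv = [] := List.eq_nil_of_length_eq_zero (by exact_mod_cast h)
          rw [hnil] at hsn
          cases hsn
        simp only [pvA_loop2, hc, Bool.false_eq_true, if_false]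
        split
        · rename_i h; exact absurd h hlen
        · exact ih inv d sn hnd hd hsn

theorem pvB_dom_of_len_zero :
    ∀ (nl : List (List String)) (rem : PySem.Set String) (d : PySem.Dict String String),
      PySem.Set.len rem = 0 → pvB_dom nl rem d = d := by
  intro nl
  cases nl with
  | nil => intro rem d _; rfl
  | cons node rest =>
    intro rem d h
    simp only [pvB_dom, h, if_true]

-- B's break-at-top node loop simulates A's break-at-bottom loop: the resulting dicts agree key by
-- key (B stores node[3] where A stores the whole row), because A's extra iteration after the set
-- empties is a no-op on the dict.
theorem pv_dom_sim :
    ∀ (nl : List (List String)) (rem : PySem.Set String)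
      (dA : PySem.Dict String (List String)) (dB : PySem.Dict String String),
      (∀ s, dB.get? s = (dA.get? s).map (fun n => PySem.List.pyGetD n 3 "")) →
      ∀ s, (pvB_dom nl rem dB).get? s =
        ((pvA_loop2 nl rem dA).get? s).map (fun n => PySem.List.pyGetD n 3 "") := by
  intro nl
  induction nl with
  | nil => intro rem dA dB hrel s; exact hrel s
  | cons node rest ih =>
    intro rem dA dB hrel s
    by_cases hz : PySem.Set.len rem = 0
    · have hnil : rem = [] := by
        simp only [PySem.Set.len_eq] at hz
        exact List.eq_nil_of_length_eq_zero (by exact_mod_cast hz)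
      have hc : PySem.Set.contains rem (pvHd node) = false := by
        subst hnil
        simp [PySem.Set.contains_eq_listContains]
      simp only [pvB_dom, hz, if_true, pvA_loop2, hc, Bool.false_eq_true, if_false]
      exact hrel s
    · by_cases hc : PySem.Set.contains rem (pvHd node) = true
      · have hrel' : ∀ t, (dB.insert (pvHd node) (PySem.List.pyGetD node 3 "")).get? t =
            ((dA.insert (pvHd node) node).get? t).map (fun n => PySem.List.pyGetD n 3 "") := by
          intro t
          by_cases ht : t = pvHd node
          · subst ht
            rw [PySem.Dict.get?_insert_self, PySem.Dict.get?_insert_self]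
            rfl
          · rw [PySem.Dict.get?_insert_of_ne _ _ ht, PySem.Dict.get?_insert_of_ne _ _ ht]
            exact hrel t
        simp only [pvB_dom, hz, if_false, hc, if_true, pvA_loop2]
        by_cases hz' : PySem.Set.len ((PySem.Set.remove? rem (pvHd node)).getD rem) = 0
        · rw [if_pos hz', pvB_dom_of_len_zero rest _ _ hz']
          exact hrel' s
        · rw [if_neg hz']
          exact ih _ _ _ hrel' s
      · have hc' : PySem.Set.contains rem (pvHd node) = false := by simpa using hc
        simp only [pvB_dom, hz, if_false, hc', Bool.false_eq_true, pvA_loop2]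
        exact ih rem dA dB hrel s

theorem pv_needed_fold_nodup :
    ∀ (L : List (List String)) (acc : PySem.Set String), acc.Nodup →
      (L.foldl (fun s e => PySem.Set.add (PySem.Set.add s (pvHd e)) (pvSnd e)) acc).Nodup := by
  intro L
  induction L with
  | nil => intro acc h; exact h
  | cons e L ih =>
    intro acc h
    exact ih _ (PySem.Set.nodup_add _ _ (PySem.Set.nodup_add _ _ h))

theorem pv_needed_nodup (el : List (List String)) : (pvNeededOf el).Nodup := by
  exact pv_needed_fold_nodup _ _ (by simp [PySem.Set.empty])

theorem pv_needed_fold_mono :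
    ∀ (L : List (List String)) (acc : PySem.Set String) (x : String), x ∈ acc →
      x ∈ L.foldl (fun s e => PySem.Set.add (PySem.Set.add s (pvHd e)) (pvSnd e)) acc := by
  intro L
  induction L with
  | nil => intro acc x h; exact h
  | cons e L ih =>
    intro acc x h
    exact ih _ x ((PySem.Set.mem_add _ _ _).mpr (Or.inl ((PySem.Set.mem_add _ _ _).mpr (Or.inl h))))

theorem pv_mem_needed_fold :
    ∀ (L : List (List String)) (acc : PySem.Set String) (e : List String), e ∈ L →
      pvHd e ∈ L.foldl (fun s e => PySem.Set.add (PySem.Set.add s (pvHd e)) (pvSnd e)) acc ∧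
      pvSnd e ∈ L.foldl (fun s e => PySem.Set.add (PySem.Set.add s (pvHd e)) (pvSnd e)) acc := by
  intro L
  induction L with
  | nil => intro acc e h; cases h
  | cons a L ih =>
    intro acc e h
    rcases List.mem_cons.mp h with rfl | h
    · constructor
      · exact pv_needed_fold_mono L _ _
          ((PySem.Set.mem_add _ _ _).mpr (Or.inl ((PySem.Set.mem_add _ _ _).mpr (Or.inr rfl))))
      · exact pv_needed_fold_mono L _ _ ((PySem.Set.mem_add _ _ _).mpr (Or.inr rfl))
    · exact ih _ e h

theorem pv_mem_needed (el : List (List String)) (e : List String) (he : e ∈ pvLocEdges el) :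
    pvHd e ∈ pvNeededOf el ∧ pvSnd e ∈ pvNeededOf el := by
  exact pv_mem_needed_fold _ _ e he

theorem pv_main_fold (nl el : List (List String)) :
    ∀ (L' : List (List String)),
      (∀ e ∈ L', pvEscapes el el.length (pvHd e) = true) →
      (∀ e ∈ L',
        PySem.List.pyGetD ((pvA_loop2 nl (pvNeededOf el) PySem.Dict.empty).getD (pvHd e) []) 3 "" =
          (pvB_dom nl (pvNeededOf el) PySem.Dict.empty).getD (pvHd e) "" ∧
        PySem.List.pyGetD ((pvA_loop2 nl (pvNeededOf el) PySem.Dict.empty).getD (pvSnd e) []) 3 "" =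
          (pvB_dom nl (pvNeededOf el) PySem.Dict.empty).getD (pvSnd e) "") →
      ∀ (c m : Int) (memo : PySem.Dict String Int),
        pvInv memo (pvClenF (pvB_succ (pvB_pairs el)) (el.length + 1)) →
        (L'.foldl (fun (acc : Int × Int) edge =>
            ((if PySem.List.pyGetD ((pvA_loop2 nl (pvNeededOf el) PySem.Dict.empty).getD (pvHd edge) []) 3 "" ≠
                  PySem.List.pyGetD ((pvA_loop2 nl (pvNeededOf el) PySem.Dict.empty).getD (pvSnd edge) []) 3 ""
              then acc.1 + 1 else acc.1),
             max (pvA_walk (pvA_start (pvLocEdges el)) (el.length + 1) (pvHd edge) 1) acc.2)) (c, m)).1 =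
          ((L'.map (fun e => (pvHd e, pvSnd e))).foldl (fun (acc : Int × Int × PySem.Dict String Int) p =>
            ((if (pvB_dom nl (pvNeededOf el) PySem.Dict.empty).getD p.1 "" ≠ (pvB_dom nl (pvNeededOf el) PySem.Dict.empty).getD p.2 ""
              then acc.1 + 1 else acc.1),
             max acc.2.1 (1 + (pvB_clen (pvB_succ (pvB_pairs el)) acc.2.2 (el.length + 1) p.1).1),
             (pvB_clen (pvB_succ (pvB_pairs el)) acc.2.2 (el.length + 1) p.1).2)) (c, m, memo)).1 ∧
        (L'.foldl (fun (acc : Int × Int) edge =>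
            ((if PySem.List.pyGetD ((pvA_loop2 nl (pvNeededOf el) PySem.Dict.empty).getD (pvHd edge) []) 3 "" ≠
                  PySem.List.pyGetD ((pvA_loop2 nl (pvNeededOf el) PySem.Dict.empty).getD (pvSnd edge) []) 3 ""
              then acc.1 + 1 else acc.1),
             max (pvA_walk (pvA_start (pvLocEdges el)) (el.length + 1) (pvHd edge) 1) acc.2)) (c, m)).2 =
          ((L'.map (fun e => (pvHd e, pvSnd e))).foldl (fun (acc : Int × Int × PySem.Dict String Int) p =>
            ((if (pvB_dom nl (pvNeededOf el) PySem.Dict.empty).getD p.1 "" ≠ (pvB_dom nl (pvNeededOf el) PySem.Dict.empty).getD p.2 ""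
              then acc.1 + 1 else acc.1),
             max acc.2.1 (1 + (pvB_clen (pvB_succ (pvB_pairs el)) acc.2.2 (el.length + 1) p.1).1),
             (pvB_clen (pvB_succ (pvB_pairs el)) acc.2.2 (el.length + 1) p.1).2)) (c, m, memo)).2.1 := by
  intro L'
  induction L' with
  | nil => intro _ _ c m memo _; exact ⟨rfl, rfl⟩
  | cons e L ih =>
    intro hesc hvals c m memo hInv
    have hescE := hesc e (List.mem_cons_self)
    have hvalsE := hvals e (List.mem_cons_self)
    have hclen := pv_clen_spec el memo (pvHd e) hInv hescE
    simp only [List.map_cons, List.foldl_cons]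
    have hwalk := pv_walk_eq el (el.length + 1) (pvHd e) 1
    rw [hwalk, hvalsE.1, hvalsE.2, hclen.1, max_comm (1 + pvClenF (pvB_succ (pvB_pairs el)) (el.length + 1) (pvHd e)) m]
    exact ih (fun x hx => hesc x (List.mem_cons_of_mem e hx))
      (fun x hx => hvals x (List.mem_cons_of_mem e hx)) _ _ _ hclen.2

-- ===== VERDICT (by name: the statement is the Claim_ definition above) =====
theorem get_edge_features_spec : Claim_equal_get_edge_features := by
  intro nl el _ hPre
  obtain ⟨hN, hE, hLoc⟩ := hPre
  show get_edge_features nl el = get_edge_features_alt nl el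
  have hsim := pv_dom_sim nl (pvNeededOf el) PySem.Dict.empty PySem.Dict.empty
    (fun s => by rw [PySem.Dict.get?_empty, PySem.Dict.get?_empty]; rfl)
  have hvals : ∀ e ∈ pvLocEdges el,
      PySem.List.pyGetD ((pvA_loop2 nl (pvNeededOf el) PySem.Dict.empty).getD (pvHd e) []) 3 "" =
        (pvB_dom nl (pvNeededOf el) PySem.Dict.empty).getD (pvHd e) "" ∧
      PySem.List.pyGetD ((pvA_loop2 nl (pvNeededOf el) PySem.Dict.empty).getD (pvSnd e) []) 3 "" =
        (pvB_dom nl (pvNeededOf el) PySem.Dict.empty).getD (pvSnd e) "" := by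
    intro e he
    obtain ⟨heEl, heLoc⟩ := List.mem_filter.mp he
    obtain ⟨_, hfirst, _⟩ := hLoc e heEl heLoc
    have key : ∀ sn, sn ∈ pvNeededOf el →
        ((nl.find? (fun m => pvHd m == sn)).any (fun n => decide (4 ≤ n.length))) = true →
        PySem.List.pyGetD ((pvA_loop2 nl (pvNeededOf el) PySem.Dict.empty).getD sn []) 3 "" =
          (pvB_dom nl (pvNeededOf el) PySem.Dict.empty).getD sn "" := by
      intro sn hmem hok
      obtain ⟨n, hfind⟩ : ∃ n, nl.find? (fun m => pvHd m == sn) = some n := by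
        cases hfo : nl.find? (fun m => pvHd m == sn) with
        | none => rw [hfo] at hok; cases hok
        | some n => exact ⟨n, rfl⟩
      have hA : (pvA_loop2 nl (pvNeededOf el) PySem.Dict.empty).get? sn = some n := by
        rw [pv_loop2_get_mem nl (pvNeededOf el) PySem.Dict.empty sn (pv_needed_nodup el)
          (fun s _ => PySem.Dict.get?_empty s) hmem]
        exact hfind
      have hB : (pvB_dom nl (pvNeededOf el) PySem.Dict.empty).get? sn =
          some (PySem.List.pyGetD n 3 "") := by
        rw [hsim sn, hA]
        rfl
      rw [PySem.Dict.getD_of_get?_eq_some _ [] hA, PySem.Dict.getD_of_get?_eq_some _ "" hB]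
    refine ⟨key (pvHd e) (pv_mem_needed el e he).1 ?_, key (pvSnd e) (pv_mem_needed el e he).2 ?_⟩
    · exact hfirst (pvHd e) (by simp)
    · exact hfirst (pvSnd e) (by simp)
  have hesc : ∀ e ∈ pvLocEdges el, pvEscapes el el.length (pvHd e) = true := by
    intro e he
    obtain ⟨heEl, heLoc⟩ := List.mem_filter.mp he
    exact (hLoc e heEl heLoc).2.2
  have hInv0 : pvInv PySem.Dict.empty (pvClenF (pvB_succ (pvB_pairs el)) (el.length + 1)) := by
    intro s v h
    rw [PySem.Dict.get?_empty] at h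
    cases h
  have hmain := pv_main_fold nl el (pvLocEdges el) hesc hvals 0 0 PySem.Dict.empty hInv0
  rw [← pv_pairs_eq] at hmain
  have hlen : ((pvLocEdges el).length : Int) = ((pvB_pairs el).length : Int) := by
    rw [pv_pairs_eq, List.length_map]
  simp only [get_edge_features, get_edge_features_alt, pv_loop1_eq, pv_needed_eq]
  exact List.cons_eq_cons.mpr ⟨hlen, List.cons_eq_cons.mpr ⟨hmain.1, by rw [hmain.2]⟩⟩
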